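-- pv_equiv track=rewrite | github.com/ellyess/OBK-Gear-Optimisation | obk/ui_state.py | build_name_lookup
-- ===== SOURCE A (Python) =====
-- def build_name_lookup(names_by_cat):
--     lookup = {}
--     ambiguous = set()
--     for cat, names in names_by_cat.items():
--         for nm in names:
--             key = nm.strip().lower()
--             if key in lookup and lookup[key][0] != cat:
--                 ambiguous.add(key)
--             else:
--                 lookup[key] = (cat, nm)
--     for k in ambiguous:
--         lookup[k] = ("AMBIGUOUS", lookup[k][1])
--     return lookup, ambiguous
-- ===== SOURCE B (Python) =====
-- def build_name_lookup(names_by_cat):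
--     occ = [(cat, nm, nm.strip().lower())
--            for cat, names in names_by_cat.items() for nm in names]
--     first_cat = {}
--     for cat, _, key in occ:
--         first_cat.setdefault(key, cat)
--     ambiguous = {key for cat, _, key in occ if cat != first_cat[key]}
--     lookup = {key: (("AMBIGUOUS" if key in ambiguous else cat), nm)
--               for cat, nm, key in occ if cat == first_cat[key]}
--     return lookup, ambiguous
-- ===== Notes on version B (the rewrite author's own statement) =====
-- stated objective: alternative
-- what changed: A's single stateful loop (dict + ambiguous-set updated per occurrence with a branch, then a second stamping loop) is replaced by comprehension passes over the flattened (cat, name, key) occurrence list: a first-category dict built with setdefault, ambiguous as a set comprehension, and the lookup as one dict comprehension whose overwrite semantics pick the last name with the key's first category.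
import Mathlib
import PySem

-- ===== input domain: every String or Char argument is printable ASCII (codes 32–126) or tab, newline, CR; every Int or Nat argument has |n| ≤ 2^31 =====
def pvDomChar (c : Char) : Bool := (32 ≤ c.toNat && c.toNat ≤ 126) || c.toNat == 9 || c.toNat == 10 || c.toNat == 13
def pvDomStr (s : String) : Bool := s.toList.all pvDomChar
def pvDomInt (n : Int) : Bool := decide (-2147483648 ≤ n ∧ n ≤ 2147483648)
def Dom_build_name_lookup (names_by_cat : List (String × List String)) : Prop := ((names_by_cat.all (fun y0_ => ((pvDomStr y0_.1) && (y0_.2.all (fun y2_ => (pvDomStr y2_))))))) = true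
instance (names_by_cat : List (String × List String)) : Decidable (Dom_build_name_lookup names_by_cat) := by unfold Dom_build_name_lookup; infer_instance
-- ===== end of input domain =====

-- B replaces A's stateful branch-per-occurrence loop by three comprehension passes over the
-- flattened occurrence list (first-category dict, ambiguous-set comprehension, dict comprehension);
-- objective: alternative decomposition, same asymptotic cost.

-- key = nm.strip().lower()  (shared by both ports; both Pythons compute it textually)
def pvKey (nm : String) : String := PySem.Str.lower (PySem.Str.strip nm)

-- ===== PORT A =====
-- one occurrence step of A's first loop; lookup[key] under the 'key in lookup' guard is
-- ported as getD with a dummy default (exact: only read when contains is true)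
def pvStepA (st : PySem.Dict String (String × String) × PySem.Set String)
    (cat nm : String) : PySem.Dict String (String × String) × PySem.Set String :=
  let key := pvKey nm
  if st.1.contains key && !((st.1.getD key ("", "")).1 == cat) then
    (st.1, PySem.Set.add st.2 key)
  else
    (st.1.insert key (cat, nm), st.2)

def build_name_lookup (names_by_cat : List (String × List String)) :
    (List (String × String × String)) × List String :=
  -- for cat, names in names_by_cat.items(): for nm in names: …
  let st := (PySem.Dict.ofList names_by_cat).items.foldl
      (fun st p => p.2.foldl (fun st nm => pvStepA st p.1 nm) st)
      ((PySem.Dict.empty : PySem.Dict String (String × String)), (PySem.Set.empty : PySem.Set String))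
  -- for k in ambiguous: lookup[k] = ("AMBIGUOUS", lookup[k][1])   (per-key update; set order irrelevant)
  let lookup := st.2.foldl
      (fun d k => d.insert k ("AMBIGUOUS", (d.getD k ("", "")).2)) st.1
  (lookup.items, st.2)

-- ===== PORT B =====
def build_name_lookup_alt (names_by_cat : List (String × List String)) :
    (List (String × String × String)) × List String :=
  -- occ = [(cat, nm, nm.strip().lower()) for cat, names in names_by_cat.items() for nm in names]
  let occ := (PySem.Dict.ofList names_by_cat).items.flatMap
      (fun p => p.2.map (fun nm => (p.1, nm, pvKey nm)))
  -- for cat, _, key in occ: first_cat.setdefault(key, cat)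
  let first_cat := occ.foldl (fun d t => d.setdefault t.2.2 t.1)
      (PySem.Dict.empty : PySem.Dict String String)
  -- first_cat[key] ported as getD "" (exact: every key of occ is a key of first_cat)
  let ambiguous : PySem.Set String :=
      PySem.Set.ofList ((occ.filter (fun t => !(t.1 == first_cat.getD t.2.2 ""))).map (fun t => t.2.2))
  -- dict comprehension: overwrite keeps first position, last value wins
  let lookup := (occ.filter (fun t => t.1 == first_cat.getD t.2.2 "")).foldl
      (fun d t => d.insert t.2.2
        ((if PySem.Set.contains ambiguous t.2.2 then "AMBIGUOUS" else t.1), t.2.1))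
      (PySem.Dict.empty : PySem.Dict String (String × String))
  (lookup.items, ambiguous)

-- ===== PRECONDITION & SPEC =====
def Spec_build_name_lookup (names_by_cat : List (String × List String)) (out : (List (String × String × String)) × List String) : Prop := out = build_name_lookup_alt names_by_cat
instance (names_by_cat : List (String × List String)) (out : (List (String × String × String)) × List String) : Decidable (Spec_build_name_lookup names_by_cat out) := by unfold Spec_build_name_lookup; infer_instance

-- ===== CLAIM (what is proved, stated in full; the proofs are below) =====
def Claim_equal_build_name_lookup : Prop := ∀ (names_by_cat : List (String × List String)), Dom_build_name_lookup names_by_cat → Spec_build_name_lookup names_by_cat (build_name_lookup names_by_cat)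

-- ===== LEMMAS AND PROOFS =====
def pvKeyOf (p : String × String) : String := pvKey p.2
def pvFC (L : List (String × String)) : PySem.Dict String String :=
  L.foldl (fun d p => d.setdefault (pvKeyOf p) p.1) PySem.Dict.empty
def pvFcv (L : List (String × String)) (k : String) : String := (pvFC L).getD k ""
def pvGood (L : List (String × String)) (p : String × String) : Bool := p.1 == pvFcv L (pvKeyOf p)
def pvLn (L : List (String × String)) (k : String) : String :=
  (((L.filter (fun p => pvKeyOf p == k && pvGood L p)).map (·.2)).getLast?).getD ""
def pvAmb (L : List (String × String)) : PySem.Set String :=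
  PySem.Set.ofList ((L.filter (fun p => !(pvGood L p))).map pvKeyOf)
def pvAState (L : List (String × String)) :
    PySem.Dict String (String × String) × PySem.Set String :=
  L.foldl (fun st q => pvStepA st q.1 q.2)
    ((PySem.Dict.empty : PySem.Dict String (String × String)), (PySem.Set.empty : PySem.Set String))

theorem pvA_flat (items : List (String × List String))
    (init : PySem.Dict String (String × String) × PySem.Set String) :
    items.foldl (fun st p => p.2.foldl (fun st nm => pvStepA st p.1 nm) st) init
      = (items.flatMap (fun p => p.2.map (fun nm => (p.1, nm)))).foldl
          (fun st q => pvStepA st q.1 q.2) init := by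
  induction items generalizing init with
  | nil => rfl
  | cons p items ih =>
      simp only [List.foldl_cons, List.flatMap_cons, List.foldl_append, List.foldl_map]
      exact ih _

theorem pvFC_get (L : List (String × String)) (d : PySem.Dict String String) (k : String) :
    (L.foldl (fun d p => d.setdefault (pvKeyOf p) p.1) d).get? k
      = (d.get? k).or ((L.find? (fun p => pvKeyOf p == k)).map (·.1)) := by
  induction L generalizing d with
  | nil => simp
  | cons p L ih =>
      simp only [List.foldl_cons]
      by_cases h : pvKeyOf p = k
      · rw [List.find?_cons_of_pos (by simp [h]), ih]
        subst h
        rw [PySem.Dict.get?_setdefault_self]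
        cases hd : d.get? (pvKeyOf p) <;> simp [Option.or]
      · rw [List.find?_cons_of_neg (by simp [h]), ih,
          PySem.Dict.get?_setdefault_of_ne d p.1 (Ne.symm h)]

theorem pvFcv_eq (L : List (String × String)) (k : String) :
    pvFcv L k = ((L.find? (fun p => pvKeyOf p == k)).map (·.1)).getD "" := by
  unfold pvFcv pvFC
  rw [PySem.Dict.getD_eq_get?_getD, pvFC_get]
  simp

theorem pvFcv_append_mem (L : List (String × String)) (p : String × String) (k : String)
    (h : k ∈ L.map pvKeyOf) : pvFcv (L ++ [p]) k = pvFcv L k := by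
  rw [pvFcv_eq, pvFcv_eq, List.find?_append]
  obtain ⟨q, hq, hk⟩ : ∃ q ∈ L, pvKeyOf q = k := by simpa using h
  have hs : (L.find? (fun p => pvKeyOf p == k)).isSome :=
    List.find?_isSome.mpr ⟨q, hq, by simp [hk]⟩
  cases hf : L.find? (fun p => pvKeyOf p == k) with
  | none => rw [hf] at hs; simp at hs
  | some u => simp

theorem pvFcv_append_new (L : List (String × String)) (p : String × String)
    (h : pvKeyOf p ∉ L.map pvKeyOf) : pvFcv (L ++ [p]) (pvKeyOf p) = p.1 := by
  rw [pvFcv_eq, List.find?_append]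
  have hf : L.find? (fun q => pvKeyOf q == pvKeyOf p) = none := by
    rw [List.find?_eq_none]
    intro x hx hbeq
    exact h (by simpa [show pvKeyOf x = pvKeyOf p by simpa using hbeq] using
      List.mem_map_of_mem (f := pvKeyOf) hx)
  simp [hf]

theorem pvGood_append_mem (L : List (String × String)) (p q : String × String)
    (h : q ∈ L) : pvGood (L ++ [p]) q = pvGood L q := by
  unfold pvGood
  rw [pvFcv_append_mem]
  exact List.mem_map_of_mem h

theorem pvShape_get? {ν : Type} (S : List String) (f : String → ν)
    (d : PySem.Dict String ν) (hit : d.items = S.map (fun k => (k, f k))) (hnd : S.Nodup)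
    (k : String) : d.get? k = if k ∈ S then some (f k) else none := by
  have hkeys : d.keys = S := by
    simp [PySem.Dict.keys, hit, List.map_map, Function.comp_def]
  by_cases h : k ∈ S
  · rw [if_pos h]
    exact PySem.Dict.get?_of_mem_items d (by rw [hit]; exact List.mem_map_of_mem h)
      (by rw [hkeys]; exact hnd)
  · rw [if_neg h]
    exact (PySem.Dict.get?_eq_none_iff_not_mem_keys d k).mpr (by rw [hkeys]; exact h)

theorem pvA_inv (L : List (String × String)) :
    (pvAState L).1.items
        = (PySem.Set.ofList (L.map pvKeyOf)).map (fun k => (k, (pvFcv L k, pvLn L k)))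
      ∧ (pvAState L).2 = pvAmb L := by
  induction L using List.reverseRecOn with
  | nil => exact ⟨rfl, rfl⟩
  | append_singleton M p ih =>
    obtain ⟨ih1, ih2⟩ := ih
    have hkk : pvKey p.2 = pvKeyOf p := rfl
    have hstep : pvAState (M ++ [p]) = pvStepA (pvAState M) p.1 p.2 := by
      unfold pvAState; rw [List.foldl_append]; rfl
    have hndS : (PySem.Set.ofList (M.map pvKeyOf)).Nodup := PySem.Set.nodup_ofList _
    have hget := pvShape_get? _ _ _ ih1 hndS
    have hmapp : (M ++ [p]).map pvKeyOf = M.map pvKeyOf ++ [pvKeyOf p] := by simp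
    have hfil : ∀ k, (M ++ [p]).filter (fun q => pvKeyOf q == k && pvGood (M ++ [p]) q)
        = M.filter (fun q => pvKeyOf q == k && pvGood M q)
          ++ (if pvKeyOf p == k && pvGood (M ++ [p]) p then [p] else []) := by
      intro k
      have hA : M.filter (fun q => pvKeyOf q == k && pvGood (M ++ [p]) q)
          = M.filter (fun q => pvKeyOf q == k && pvGood M q) :=
        List.filter_congr (fun q hq => by rw [pvGood_append_mem M p q hq])
      have hB : [p].filter (fun q => pvKeyOf q == k && pvGood (M ++ [p]) q)
          = (if pvKeyOf p == k && pvGood (M ++ [p]) p then [p] else []) := by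
        simp [List.filter_cons]
      rw [List.filter_append, hA, hB]
    have hfil2 : (M ++ [p]).filter (fun q => !pvGood (M ++ [p]) q)
        = M.filter (fun q => !pvGood M q)
          ++ (if pvGood (M ++ [p]) p then [] else [p]) := by
      have hA : M.filter (fun q => !pvGood (M ++ [p]) q)
          = M.filter (fun q => !pvGood M q) :=
        List.filter_congr (fun q hq => by rw [pvGood_append_mem M p q hq])
      have hB : [p].filter (fun q => !pvGood (M ++ [p]) q)
          = (if pvGood (M ++ [p]) p then [] else [p]) := by
        by_cases hg : pvGood (M ++ [p]) p <;> simp [hg]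
      rw [List.filter_append, hA, hB]
    by_cases hmem : pvKeyOf p ∈ M.map pvKeyOf
    · -- key already present
      have hcmem : (pvAState M).1.contains (pvKeyOf p) = true := by
        rw [PySem.Dict.contains_eq_isSome_get?, hget]
        simp [PySem.Set.mem_ofList, hmem]
      have hgetD : (pvAState M).1.getD (pvKeyOf p) ("", "")
          = (pvFcv M (pvKeyOf p), pvLn M (pvKeyOf p)) := by
        rw [PySem.Dict.getD_eq_get?_getD, hget]
        simp [PySem.Set.mem_ofList, hmem]
      have hSapp : PySem.Set.ofList ((M ++ [p]).map pvKeyOf)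
          = PySem.Set.ofList (M.map pvKeyOf) := by
        rw [hmapp, PySem.Set.ofList_append_singleton,
          PySem.Set.add_of_mem (by simpa [PySem.Set.mem_ofList] using hmem)]
      rw [hstep]
      simp only [pvStepA, hkk]
      rw [hcmem, hgetD]
      simp only [Bool.true_and]
      by_cases hfc : pvFcv M (pvKeyOf p) = p.1
      · -- same category as the first: overwrite name, nothing ambiguous
        have hgoodp : pvGood (M ++ [p]) p = true := by
          unfold pvGood
          rw [pvFcv_append_mem M p _ hmem]
          simp [hfc]
        simp only [hfc, beq_self_eq_true, Bool.not_true, Bool.false_eq_true, if_false]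
        constructor
        · rw [PySem.Dict.items_insert_of_contains _ _ hcmem, ih1, hSapp, List.map_map]
          apply List.map_eq_map_iff.mpr
          intro k hkS
          have hkM : k ∈ M.map pvKeyOf := (PySem.Set.mem_ofList _ _).mp hkS
          by_cases hk0 : k = pvKeyOf p
          · subst hk0
            have hln : pvLn (M ++ [p]) (pvKeyOf p) = p.2 := by
              unfold pvLn
              rw [hfil (pvKeyOf p)]
              simp [hgoodp]
            have hfcv' : pvFcv (M ++ [p]) (pvKeyOf p) = p.1 := by
              rw [pvFcv_append_mem M p _ hmem, hfc]
            simp [Function.comp, hln, hfcv']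
          · have hln : pvLn (M ++ [p]) k = pvLn M k := by
              unfold pvLn
              rw [hfil k]
              simp [Ne.symm hk0]
            simp [Function.comp, hk0, hln, pvFcv_append_mem M p k hkM]
        · rw [ih2]
          unfold pvAmb
          rw [hfil2, hgoodp]
          simp
      · -- different category: mark ambiguous, keep entry
        have hgoodp : pvGood (M ++ [p]) p = false := by
          unfold pvGood
          rw [pvFcv_append_mem M p _ hmem]
          simp [Ne.symm hfc]
        have hbeq : (pvFcv M (pvKeyOf p) == p.1) = false := by simp [hfc]
        simp only [hbeq, Bool.not_false, if_true]
        constructor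
        · rw [ih1, hSapp]
          apply List.map_eq_map_iff.mpr
          intro k hkS
          have hkM : k ∈ M.map pvKeyOf := (PySem.Set.mem_ofList _ _).mp hkS
          have hln : pvLn (M ++ [p]) k = pvLn M k := by
            unfold pvLn
            rw [hfil k]
            by_cases hk0 : k = pvKeyOf p
            · subst hk0; simp [hgoodp]
            · simp [Ne.symm hk0]
          rw [hln, pvFcv_append_mem M p k hkM]
        · rw [ih2]
          unfold pvAmb
          rw [hfil2, hgoodp]
          simp [List.map_append, PySem.Set.ofList_append_singleton]
    · -- new key: first occurrence of pvKeyOf p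
      have hc : (pvAState M).1.contains (pvKeyOf p) = false := by
        rw [PySem.Dict.contains_eq_isSome_get?, hget]
        simp [PySem.Set.mem_ofList, hmem]
      have hfcv : pvFcv (M ++ [p]) (pvKeyOf p) = p.1 := pvFcv_append_new M p hmem
      have hgoodp : pvGood (M ++ [p]) p = true := by
        unfold pvGood; rw [hfcv]; simp
      rw [hstep]
      simp only [pvStepA, hkk]
      rw [hc]
      simp only [Bool.false_and, Bool.false_eq_true, if_false]
      constructor
      · rw [PySem.Dict.items_insert_of_not_contains _ _ hc, ih1,
          hmapp, PySem.Set.ofList_append_singleton,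
          PySem.Set.add_of_not_mem (by simpa [PySem.Set.mem_ofList] using hmem),
          List.map_append]
        congr 1
        · apply List.map_eq_map_iff.mpr
          intro k hkS
          have hkM : k ∈ M.map pvKeyOf := (PySem.Set.mem_ofList _ _).mp hkS
          have hkne : pvKeyOf p ≠ k := fun h => hmem (h ▸ hkM)
          have hl : pvLn (M ++ [p]) k = pvLn M k := by
            unfold pvLn
            rw [hfil k]
            simp [hkne]
          rw [hl, pvFcv_append_mem M p k hkM]
        · have hlnp : pvLn (M ++ [p]) (pvKeyOf p) = p.2 := by
            unfold pvLn
            rw [hfil (pvKeyOf p)]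
            have hMnil : M.filter (fun q => pvKeyOf q == pvKeyOf p && pvGood M q) = [] := by
              rw [List.filter_eq_nil_iff]
              intro q hq hb
              simp only [Bool.and_eq_true, beq_iff_eq] at hb
              exact hmem (hb.1 ▸ List.mem_map_of_mem hq)
            rw [hMnil]
            simp [hgoodp]
          simp [hlnp, hfcv]
      · rw [ih2]
        unfold pvAmb
        rw [hfil2, hgoodp]
        simp

theorem pvStamp (ks : List String) (S : List String) (f : String → String × String)
    (hnd : S.Nodup) (hsub : ∀ k ∈ ks, k ∈ S)
    (d : PySem.Dict String (String × String)) (hd : d.items = S.map (fun k => (k, f k))) :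
    (ks.foldl (fun d k => d.insert k ("AMBIGUOUS", (d.getD k ("", "")).2)) d).items
      = S.map (fun k => (k, ((if k ∈ ks then "AMBIGUOUS" else (f k).1), (f k).2))) := by
  induction ks generalizing f d with
  | nil => simpa using hd
  | cons a ks ih =>
    have haS : a ∈ S := hsub a (by simp)
    have hkeys : d.keys = S := by
      simp [PySem.Dict.keys, hd, List.map_map, Function.comp_def]
    have hndk : d.keys.Nodup := by rw [hkeys]; exact hnd
    have hgetD : d.getD a ("", "") = f a :=
      PySem.Dict.getD_of_mem_items d (by rw [hd]; exact List.mem_map_of_mem haS) hndk _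
    have hcont : d.contains a = true := by
      rw [PySem.Dict.contains_eq_isSome_get?,
        pvShape_get? S f d hd hnd a]
      simp [haS]
    rw [List.foldl_cons, hgetD]
    have hitems' : (d.insert a ("AMBIGUOUS", (f a).2)).items
        = S.map (fun k => (k, (fun k => if k = a then ("AMBIGUOUS", (f a).2) else f k) k)) := by
      rw [PySem.Dict.items_insert_of_contains _ _ hcont, hd, List.map_map]
      apply List.map_eq_map_iff.mpr
      intro k hk
      by_cases hka : k = a
      · subst hka; simp [Function.comp]
      · simp [Function.comp, hka]
    rw [ih (fun k => if k = a then ("AMBIGUOUS", (f a).2) else f k)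
      (fun k hk => hsub k (by simp [hk])) _ hitems']
    apply List.map_eq_map_iff.mpr
    intro k hk
    by_cases hka : k = a
    · subst hka; simp
    · by_cases hks : k ∈ ks <;> simp [hka, hks]

theorem pvBLoop (l : List (String × String × String))
    (v : String × String × String → String × String) :
    (l.foldl (fun d t => d.insert t.2.2 (v t))
        (PySem.Dict.empty : PySem.Dict String (String × String))).items
      = (PySem.Set.ofList (l.map (·.2.2))).map
          (fun k => (k, (((l.filter (fun t => t.2.2 == k)).map v).getLast?).getD ("", ""))) := by
  induction l using List.reverseRecOn with
  | nil => rfl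
  | append_singleton m t ih =>
    have hS : PySem.Set.ofList ((m ++ [t]).map (·.2.2))
        = (PySem.Set.ofList (m.map (·.2.2))).add t.2.2 := by
      rw [List.map_append]
      simp only [List.map_cons, List.map_nil]
      rw [PySem.Set.ofList_append_singleton]
    have hfil : ∀ k, (m ++ [t]).filter (fun t' => t'.2.2 == k)
        = m.filter (fun t' => t'.2.2 == k) ++ (if t.2.2 == k then [t] else []) := by
      intro k
      rw [List.filter_append]
      congr 1
      simp [List.filter_cons]
    have hnd : (PySem.Set.ofList (m.map (·.2.2))).Nodup := PySem.Set.nodup_ofList _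
    rw [List.foldl_append, List.foldl_cons, List.foldl_nil, hS]
    by_cases hmem : t.2.2 ∈ m.map (·.2.2)
    · rw [PySem.Set.add_of_mem (by simpa [PySem.Set.mem_ofList] using hmem)]
      have hcont : ((m.foldl (fun d t => d.insert t.2.2 (v t)) PySem.Dict.empty)).contains t.2.2 = true := by
        rw [PySem.Dict.contains_eq_isSome_get?, pvShape_get? _ _ _ ih hnd]
        simp [PySem.Set.mem_ofList, hmem]
      rw [PySem.Dict.items_insert_of_contains _ _ hcont, ih, List.map_map]
      apply List.map_eq_map_iff.mpr
      intro k hk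
      by_cases hka : k = t.2.2
      · subst hka
        rw [hfil t.2.2]
        simp [Function.comp]
      · rw [hfil k]
        simp [Function.comp, hka, Ne.symm hka]
    · rw [PySem.Set.add_of_not_mem (by simpa [PySem.Set.mem_ofList] using hmem)]
      have hcont : ((m.foldl (fun d t => d.insert t.2.2 (v t)) PySem.Dict.empty)).contains t.2.2 = false := by
        rw [PySem.Dict.contains_eq_isSome_get?, pvShape_get? _ _ _ ih hnd]
        simp [PySem.Set.mem_ofList, hmem]
      rw [PySem.Dict.items_insert_of_not_contains _ _ hcont, ih, List.map_append]
      congr 1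
      · apply List.map_eq_map_iff.mpr
        intro k hk
        have hkm : k ∈ m.map (·.2.2) := (PySem.Set.mem_ofList _ _).mp hk
        have hne : t.2.2 ≠ k := fun h => hmem (h ▸ hkm)
        rw [hfil k]
        simp [hne]
      · simp only [List.map_cons, List.map_nil]
        rw [hfil t.2.2]
        have hmnil : m.filter (fun t' => t'.2.2 == t.2.2) = [] := by
          rw [List.filter_eq_nil_iff]
          intro q hq hb
          have hqm := List.mem_map_of_mem (f := (·.2.2)) hq
          simp only at hqm
          rw [(beq_iff_eq).mp hb] at hqm
          exact hmem hqm
        rw [hmnil]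
        simp

theorem pvUpdate_filter {τ : Type} (l : List τ) (key : τ → String) (p : τ → Bool) :
    ∀ s : PySem.Set String,
    (∀ k, k ∈ l.map key → k ∉ s →
        ∃ t, l.find? (fun t => key t == k) = some t ∧ p t = true) →
    PySem.Set.update s ((l.filter p).map key) = PySem.Set.update s (l.map key) := by
  induction l with
  | nil => intro s _; rfl
  | cons t l ih =>
    intro s hC
    by_cases hp : p t = true
    · rw [List.filter_cons_of_pos hp]
      simp only [List.map_cons, PySem.Set.update_cons]
      apply ih
      intro k hk hks
      have hkt : k ≠ key t := by
        intro h
        exact hks ((PySem.Set.mem_add s (key t) k).mpr (Or.inr h))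
      have hksold : k ∉ s := fun h =>
        hks ((PySem.Set.mem_add s (key t) k).mpr (Or.inl h))
      obtain ⟨u, hu, hpu⟩ := hC k (by simp [hk]) hksold
      rw [List.find?_cons_of_neg (by simp [Ne.symm hkt])] at hu
      exact ⟨u, hu, hpu⟩
    · have hpf : p t = false := by simpa using hp
      have hts : key t ∈ s := by
        by_contra hns
        obtain ⟨u, hu, hpu⟩ := hC (key t) (by simp) hns
        rw [List.find?_cons_of_pos (by simp)] at hu
        have : u = t := by simpa using hu.symm
        rw [this, hpf] at hpu
        exact Bool.false_ne_true hpu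
      rw [List.filter_cons_of_neg (by simp [hpf])]
      simp only [List.map_cons, PySem.Set.update_cons, PySem.Set.add_of_mem hts]
      apply ih
      intro k hk hks
      have hkt : key t ≠ k := fun h => hks (h ▸ hts)
      obtain ⟨u, hu, hpu⟩ := hC k (by simp [hk]) hks
      rw [List.find?_cons_of_neg (by simp [hkt])] at hu
      exact ⟨u, hu, hpu⟩

theorem pvMain (nbc : List (String × List String)) :
    build_name_lookup nbc = build_name_lookup_alt nbc := by
  simp only [build_name_lookup, build_name_lookup_alt]
  generalize (PySem.Dict.ofList nbc).items = items
  rw [pvA_flat]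
  set Lp := items.flatMap (fun p => p.2.map (fun nm => (p.1, nm))) with hLp
  have hocc : List.flatMap (fun p => List.map (fun nm => (p.1, nm, pvKey nm)) p.2) items
      = Lp.map (fun q => (q.1, q.2, pvKeyOf q)) := by
    rw [hLp, List.map_flatMap]
    simp [List.map_map, Function.comp_def, pvKeyOf]
  rw [hocc]
  have hfc : (Lp.map (fun q => (q.1, q.2, pvKeyOf q))).foldl
      (fun d t => d.setdefault t.2.2 t.1) PySem.Dict.empty = pvFC Lp := by
    rw [List.foldl_map]; rfl
  rw [hfc]
  have hbad : (Lp.map (fun q => (q.1, q.2, pvKeyOf q))).filter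
        (fun t => !(t.1 == (pvFC Lp).getD t.2.2 ""))
      = (Lp.filter (fun q => !(pvGood Lp q))).map (fun q => (q.1, q.2, pvKeyOf q)) := by
    rw [List.filter_map]; rfl
  have hgood : (Lp.map (fun q => (q.1, q.2, pvKeyOf q))).filter
        (fun t => t.1 == (pvFC Lp).getD t.2.2 "")
      = (Lp.filter (pvGood Lp)).map (fun q => (q.1, q.2, pvKeyOf q)) := by
    rw [List.filter_map]; rfl
  rw [hbad, hgood]
  have hambm : PySem.Set.ofList
        (((Lp.filter (fun q => !(pvGood Lp q))).map (fun q => (q.1, q.2, pvKeyOf q))).map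
          (fun t => t.2.2))
      = pvAmb Lp := by
    rw [List.map_map]; rfl
  rw [hambm]
  have hAst : List.foldl (fun st q => pvStepA st q.1 q.2)
      ((PySem.Dict.empty : PySem.Dict String (String × String)),
        (PySem.Set.empty : PySem.Set String)) Lp = pvAState Lp := rfl
  rw [hAst]
  obtain ⟨h1, h2⟩ := pvA_inv Lp
  rw [h2]
  have hsub : ∀ k ∈ pvAmb Lp, k ∈ PySem.Set.ofList (Lp.map pvKeyOf) := by
    intro k hk
    rw [PySem.Set.mem_ofList]
    unfold pvAmb at hk
    rw [PySem.Set.mem_ofList] at hk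
    obtain ⟨q, hq, rfl⟩ := List.mem_map.mp hk
    exact List.mem_map_of_mem (List.mem_of_mem_filter hq)
  rw [pvStamp (pvAmb Lp) (PySem.Set.ofList (Lp.map pvKeyOf))
    (fun k => (pvFcv Lp k, pvLn Lp k)) (PySem.Set.nodup_ofList _) hsub _ h1]
  rw [pvBLoop ((Lp.filter (pvGood Lp)).map (fun q => (q.1, q.2, pvKeyOf q)))
    (fun t => ((if (pvAmb Lp).contains t.2.2 = true then "AMBIGUOUS" else t.1), t.2.1))]
  have hfirstgood : ∀ k, k ∈ Lp.map pvKeyOf → k ∉ ([] : PySem.Set String) →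
      ∃ t, Lp.find? (fun t => pvKeyOf t == k) = some t ∧ pvGood Lp t = true := by
    intro k hk _
    obtain ⟨q, hq, hkq⟩ := List.mem_map.mp hk
    have hs : (Lp.find? (fun t => pvKeyOf t == k)).isSome :=
      List.find?_isSome.mpr ⟨q, hq, by simp [hkq]⟩
    cases hu : Lp.find? (fun t => pvKeyOf t == k) with
    | none => rw [hu] at hs; simp at hs
    | some u =>
      refine ⟨u, rfl, ?_⟩
      have hku : pvKeyOf u = k := by simpa using List.find?_some hu
      unfold pvGood
      rw [hku, pvFcv_eq, hu]
      simp
  have hmm : (List.map (fun q => (q.1, q.2, pvKeyOf q)) (Lp.filter (pvGood Lp))).map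
      (fun x => x.2.2) = (Lp.filter (pvGood Lp)).map pvKeyOf := by
    rw [List.map_map]; rfl
  have hSB : PySem.Set.ofList ((Lp.filter (pvGood Lp)).map pvKeyOf)
      = PySem.Set.ofList (Lp.map pvKeyOf) := by
    rw [← PySem.Set.update_nil_left, ← PySem.Set.update_nil_left]
    exact pvUpdate_filter Lp pvKeyOf (pvGood Lp) [] hfirstgood
  rw [hmm, hSB]
  refine Prod.ext_iff.mpr ⟨?_, rfl⟩
  simp only
  apply List.map_eq_map_iff.mpr
  intro k hkS
  have hkM : k ∈ Lp.map pvKeyOf := (PySem.Set.mem_ofList _ _).mp hkS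
  have hfl : (List.map (fun q => (q.1, q.2, pvKeyOf q)) (Lp.filter (pvGood Lp))).filter
        (fun t => t.2.2 == k)
      = (Lp.filter (fun q => pvKeyOf q == k && pvGood Lp q)).map (fun q => (q.1, q.2, pvKeyOf q)) := by
    rw [List.filter_map, List.filter_filter]; rfl
  rw [hfl, List.map_map]
  -- the occurrences of key k whose category is k's first category
  obtain ⟨u, hu, hgu⟩ := hfirstgood k hkM (by simp)
  have hku : pvKeyOf u = k := by simpa using List.find?_some hu
  have humem : u ∈ Lp.filter (fun q => pvKeyOf q == k && pvGood Lp q) :=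
    List.mem_filter.mpr ⟨List.mem_of_find?_eq_some hu, by simp [hku, hgu]⟩
  have hfcvk : pvFcv Lp k = u.1 := by rw [pvFcv_eq, hu]; rfl
  have hmapv : (Lp.filter (fun q => pvKeyOf q == k && pvGood Lp q)).map
        ((fun t => ((if (pvAmb Lp).contains t.2.2 = true then "AMBIGUOUS" else t.1), t.2.1))
          ∘ (fun q => (q.1, q.2, pvKeyOf q)))
      = (Lp.filter (fun q => pvKeyOf q == k && pvGood Lp q)).map
        (fun q => ((if (pvAmb Lp).contains k = true then "AMBIGUOUS" else pvFcv Lp k), q.2)) := by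
    apply List.map_congr_left
    intro q hq
    obtain ⟨hqLp, hq2⟩ := List.mem_filter.mp hq
    have hkq : pvKeyOf q = k := by
      have := hq2; simp only [Bool.and_eq_true, beq_iff_eq] at this; exact this.1
    have hgq : q.1 = pvFcv Lp k := by
      have := hq2; simp only [Bool.and_eq_true, beq_iff_eq] at this
      have hg := this.2
      unfold pvGood at hg
      rw [hkq] at hg
      simpa using hg
    simp [Function.comp, hkq, hgq]
  rw [hmapv]
  cases hql : (Lp.filter (fun q => pvKeyOf q == k && pvGood Lp q)).getLast? with
  | none => exact absurd (List.getLast?_eq_none_iff.mp hql) (List.ne_nil_of_mem humem)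
  | some ql =>
    have hlnk : pvLn Lp k = ql.2 := by
      unfold pvLn
      rw [List.getLast?_map, hql]
      rfl
    rw [List.getLast?_map, hql]
    simp only [Option.map_some, Option.getD_some, hlnk]
    by_cases hm : k ∈ pvAmb Lp
    · simp [hm]
    · simp [hm]

-- ===== VERDICT (by name: the statement is the Claim_ definition above) =====
theorem build_name_lookup_spec : Claim_equal_build_name_lookup := by
  intro names_by_cat _
  unfold Spec_build_name_lookup
  exact pvMain names_by_cat
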